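-- pv_equiv track=rewrite | github.com/deanmoses/pindata | scripts/apply_fields.py | _insert_field
-- ===== SOURCE A (Python) =====
-- def _insert_field(frontmatter_lines: list[str], key: str, value: str, property_order: list[str]) -> list[str]:
--     """Insert a key: value line at the correct position in frontmatter lines.
--
--     frontmatter_lines[0] is '---' and frontmatter_lines[-1] is '---'.
--     Fields are inserted according to the canonical property_order from
--     the JSON schema.
--     """
--     target_idx = property_order.index(key) if key in property_order else len(property_order)
--
--     # Find the best insertion point: after the last existing field that
--     # comes before this field in schema order.
--     insert_after = 0  # after opening '---'
--     for i, line in enumerate(frontmatter_lines):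
--         if i == 0 or i == len(frontmatter_lines) - 1:
--             continue
--         # Extract the field name from lines like "key: value" or "key:"
--         # Skip continuation lines (indented, like list items under abbreviations)
--         if line.startswith(" ") or line.startswith("-"):
--             continue
--         field_name = line.split(":")[0].strip()
--         if field_name in property_order:
--             field_idx = property_order.index(field_name)
--             if field_idx < target_idx:
--                 # Move past this field and any continuation lines
--                 insert_after = i
--                 for j in range(i + 1, len(frontmatter_lines) - 1):
--                     if frontmatter_lines[j].startswith(" ") or frontmatter_lines[j].startswith("-"):
--                         insert_after = j
--                     else:
--                         break
--
--     new_line = f"{key}: {value}"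
--     result = frontmatter_lines.copy()
--     result.insert(insert_after + 1, new_line)
--     return result
-- ===== SOURCE B (Python) =====
-- def _insert_field(frontmatter_lines: list[str], key: str, value: str, property_order: list[str]) -> list[str]:
--     """Insert a key: value line at the schema-ordered position (block-list decomposition)."""
--     n = len(frontmatter_lines)
--     # Pass 1: group the body lines into blocks (field_name, end_index), where a
--     # block's end_index is extended over its indented / '-' continuation lines.
--     blocks = []
--     for i in range(1, n - 1):
--         line = frontmatter_lines[i]
--         if line.startswith(" ") or line.startswith("-"):
--             if blocks:
--                 blocks[-1] = (blocks[-1][0], i)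
--         else:
--             blocks.append((line.split(":")[0].strip(), i))
--     target_idx = property_order.index(key) if key in property_order else len(property_order)
--     # Pass 2: insert after the last block whose field precedes key in schema order.
--     insert_after = 0
--     for name, end in blocks:
--         if name in property_order and property_order.index(name) < target_idx:
--             insert_after = end
--     result = frontmatter_lines.copy()
--     result.insert(insert_after + 1, f"{key}: {value}")
--     return result
-- ===== Notes on version B (the rewrite author's own statement) =====
-- stated objective: alternative
-- what changed: B replaces A's single loop with an inner lookahead scan over continuation lines by a two-pass decomposition: one pass groups body lines into (field_name, end_index) blocks, a second pass picks the last block whose field precedes the key in schema order.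
import Mathlib
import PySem

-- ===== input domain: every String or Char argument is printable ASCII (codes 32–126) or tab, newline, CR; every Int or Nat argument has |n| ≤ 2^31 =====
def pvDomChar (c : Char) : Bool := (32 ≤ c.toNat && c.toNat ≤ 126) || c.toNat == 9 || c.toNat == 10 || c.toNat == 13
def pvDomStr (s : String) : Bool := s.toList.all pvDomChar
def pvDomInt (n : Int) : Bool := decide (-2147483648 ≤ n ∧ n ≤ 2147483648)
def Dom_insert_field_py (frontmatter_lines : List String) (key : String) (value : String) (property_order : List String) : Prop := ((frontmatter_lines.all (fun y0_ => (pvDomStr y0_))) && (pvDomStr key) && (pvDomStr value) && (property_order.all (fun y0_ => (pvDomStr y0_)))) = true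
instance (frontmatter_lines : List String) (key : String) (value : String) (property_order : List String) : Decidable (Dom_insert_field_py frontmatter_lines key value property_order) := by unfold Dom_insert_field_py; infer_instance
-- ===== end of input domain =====

-- B re-implements A by a different decomposition: one pass grouping the body lines into
-- (field_name, end_index) blocks replaces A's inner lookahead scan; same return value, no mutation.

-- ===== PORT A =====
-- shared one-liners: `line.startswith(" ") or line.startswith("-")` and `line.split(":")[0].strip()`,
-- textually identical in both Python sources
def pvIsCont (line : String) : Bool :=
  PySem.Str.startswith line " " || PySem.Str.startswith line "-"

def pvFieldName (line : String) : String :=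
  PySem.Str.strip (((PySem.Str.split? line ":").getD []).headD "")  -- sep ":" ≠ "", so split? is `some`

-- A's inner `for j in range(i+1, len-1): if cont: insert_after = j else: break`
-- (fm[j] is in range whenever read, so `getD` is exact here)
def pvExtendA (fm : List String) (stop j : Nat) (acc : Int) : Int :=
  if j < stop then
    if pvIsCont (fm.getD j "") then pvExtendA fm stop (j + 1) (j : Int) else acc
  else acc
termination_by stop - j

-- A's outer loop body over `enumerate(frontmatter_lines)`
def pvStepA (fm : List String) (order : List String) (tidx : Nat) (ia : Int) (p : Int × String) : Int :=
  if p.1 == 0 || p.1 == (fm.length : Int) - 1 then ia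
  else if pvIsCont p.2 then ia
  else
    match PySem.List.index? order (pvFieldName p.2) with
    | some fidx => if fidx < tidx then pvExtendA fm (fm.length - 1) (p.1.toNat + 1) p.1 else ia
    | none => ia

def insert_field_py (frontmatter_lines : List String) (key : String) (value : String) (property_order : List String) : List String :=
  let target_idx : Nat :=
    match PySem.List.index? property_order key with
    | some i => i
    | none => property_order.length
  let insert_after : Int :=
    (PySem.List.enumerate frontmatter_lines 0).foldl (pvStepA frontmatter_lines property_order target_idx) 0
  PySem.List.insert frontmatter_lines (insert_after + 1) (key ++ ": " ++ value)

-- ===== PORT B =====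
-- pass 1 body: append a new block, or extend the last block's end over a continuation line
def pvStepB1 (fm : List String) (bs : List (String × Int)) (i : Int) : List (String × Int) :=
  let line := PySem.List.pyGetD fm i ""
  if pvIsCont line then
    if bs.isEmpty then bs else bs.dropLast ++ [((bs.getLastD ("", 0)).1, i)]
  else bs ++ [(pvFieldName line, i)]

-- pass 2 body: last block whose field precedes the key in schema order wins
def pvStepB2 (order : List String) (tidx : Nat) (ia : Int) (p : String × Int) : Int :=
  match PySem.List.index? order p.1 with
  | some r => if r < tidx then p.2 else ia
  | none => ia

def insert_field_py_alt (frontmatter_lines : List String) (key : String) (value : String) (property_order : List String) : List String :=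
  let n := frontmatter_lines.length
  let blocks : List (String × Int) :=
    (PySem.List.pyRange 1 ((n : Int) - 1) 1).foldl (pvStepB1 frontmatter_lines) []
  let target_idx : Nat :=
    match PySem.List.index? property_order key with
    | some i => i
    | none => property_order.length
  let insert_after : Int := blocks.foldl (pvStepB2 property_order target_idx) 0
  PySem.List.insert frontmatter_lines (insert_after + 1) (key ++ ": " ++ value)

-- ===== PRECONDITION & SPEC =====
def Spec_insert_field_py (frontmatter_lines : List String) (key : String) (value : String) (property_order : List String) (out : List String) : Prop := out = insert_field_py_alt frontmatter_lines key value property_order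
instance (frontmatter_lines : List String) (key : String) (value : String) (property_order : List String) (out : List String) : Decidable (Spec_insert_field_py frontmatter_lines key value property_order out) := by unfold Spec_insert_field_py; infer_instance

-- ===== CLAIM (what is proved, stated in full; the proofs are below) =====
def Claim_equal_insert_field_py : Prop := ∀ (frontmatter_lines : List String) (key : String) (value : String) (property_order : List String), Dom_insert_field_py frontmatter_lines key value property_order → Spec_insert_field_py frontmatter_lines key value property_order (insert_field_py frontmatter_lines key value property_order)

-- ===== LEMMAS AND PROOFS =====

-- qualifying test shared by both proofs
def pvG (order : List String) (tidx : Nat) (name : String) : Bool :=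
  match PySem.List.index? order name with
  | some r => decide (r < tidx)
  | none => false

-- reference loop: processes body indices 1 ≤ i < n-1 with a flag `ext` = "the open block qualifies"
def pvRefLoop (fm : List String) (g : String → Bool) (i : Nat) (ia : Int) (ext : Bool) : Int :=
  if i < fm.length - 1 then
    let line := fm.getD i ""
    if pvIsCont line then pvRefLoop fm g (i + 1) (if ext then (i : Int) else ia) ext
    else if g (pvFieldName line) then pvRefLoop fm g (i + 1) (i : Int) true
    else pvRefLoop fm g (i + 1) ia false
  else ia
termination_by fm.length - 1 - i

-- pvStepB2 is "if the field qualifies, take its end"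
theorem pvStepB2_eq (order : List String) (tidx : Nat) (ia : Int) (p : String × Int) :
    pvStepB2 order tidx ia p = if pvG order tidx p.1 = true then p.2 else ia := by
  unfold pvStepB2 pvG
  cases PySem.List.index? order p.1 with
  | none => simp
  | some r => by_cases h : r < tidx <;> simp [h]

-- interior steps of A's fold (1 ≤ i < n-1): the two skip guards are off
theorem pvStepA_interior (fm order : List String) (tidx : Nat) (ia : Int) (i : Nat) (l : String)
    (_h1 : 1 ≤ i) (h2 : i < fm.length - 1) :
    pvStepA fm order tidx ia ((i : Int), l)
      = if pvIsCont l then ia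
        else match PySem.List.index? order (pvFieldName l) with
          | some fidx => if fidx < tidx then pvExtendA fm (fm.length - 1) (i + 1) (i : Int) else ia
          | none => ia := by
  unfold pvStepA
  have g0 : (((i : Int)) == (0 : Int)) = false := by simp; omega
  have g1 : (((i : Int)) == ((fm.length : Int) - 1)) = false := by simp; omega
  simp only [g0, g1, Bool.or_self]
  simp [Int.toNat_natCast]

theorem pvEnum_drop_cons (fm : List String) (i : Nat) (h : i < fm.length) :
    (PySem.List.enumerate fm 0).drop i
      = ((i : Int), fm.getD i "") :: (PySem.List.enumerate fm 0).drop (i + 1) := by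
  have hlen : i < (PySem.List.enumerate fm 0).length := by
    simpa [PySem.List.length_enumerate] using h
  rw [List.drop_eq_getElem_cons hlen]
  congr 1
  rw [PySem.List.getElem_enumerate]
  simp [List.getD_eq_getElem?_getD, List.getElem?_eq_getElem h]

theorem pvEnum_drop_ge (fm : List String) (i : Nat) (h : fm.length ≤ i) :
    (PySem.List.enumerate fm 0).drop i = [] := by
  apply List.drop_eq_nil_of_le
  simpa [PySem.List.length_enumerate] using h

theorem pvA_tail (fm order : List String) (tidx : Nat) (i : Nat) (ia : Int)
    (h1 : 1 ≤ i) (hge : fm.length - 1 ≤ i) :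
    ((PySem.List.enumerate fm 0).drop i).foldl (pvStepA fm order tidx) ia = ia := by
  by_cases hn : fm.length ≤ i
  · rw [pvEnum_drop_ge fm i hn]; rfl
  · have hlt' : i < fm.length := by omega
    rw [pvEnum_drop_cons fm i hlt']
    simp only [List.foldl_cons]
    have hstep : pvStepA fm order tidx ia ((i : Int), fm.getD i "") = ia := by
      unfold pvStepA
      have hb : (((i : Int)) == ((fm.length : Int) - 1)) = true := by simp; omega
      simp [hb]
    rw [hstep, pvEnum_drop_ge fm (i + 1) (by omega)]; rfl

theorem pvA_eq_ref (fm order : List String) (tidx : Nat) :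
    ∀ i : Nat, 1 ≤ i →
      (∀ ia : Int,
        ((PySem.List.enumerate fm 0).drop i).foldl (pvStepA fm order tidx) ia
          = pvRefLoop fm (pvG order tidx) i ia false) ∧
      (∀ acc : Int,
        pvRefLoop fm (pvG order tidx) i acc true
          = ((PySem.List.enumerate fm 0).drop i).foldl (pvStepA fm order tidx)
              (pvExtendA fm (fm.length - 1) i acc)) := by
  suffices H : ∀ k i : Nat, fm.length - 1 - i ≤ k → 1 ≤ i →
      (∀ ia : Int,
        ((PySem.List.enumerate fm 0).drop i).foldl (pvStepA fm order tidx) ia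
          = pvRefLoop fm (pvG order tidx) i ia false) ∧
      (∀ acc : Int,
        pvRefLoop fm (pvG order tidx) i acc true
          = ((PySem.List.enumerate fm 0).drop i).foldl (pvStepA fm order tidx)
              (pvExtendA fm (fm.length - 1) i acc)) by
    exact fun i hi => H fm.length i (by omega) hi
  intro k
  induction k with
  | zero =>
    intro i hk h1
    have hge : fm.length - 1 ≤ i := by omega
    have hstop : ¬ i < fm.length - 1 := by omega
    refine ⟨fun ia => ?_, fun acc => ?_⟩
    · rw [pvRefLoop.eq_def, if_neg hstop]
      exact pvA_tail fm order tidx i ia h1 hge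
    · have hext : pvExtendA fm (fm.length - 1) i acc = acc := by
        rw [pvExtendA.eq_def, if_neg hstop]
      rw [pvRefLoop.eq_def, if_neg hstop, hext,
        pvA_tail fm order tidx i acc h1 hge]
  | succ k ih =>
    intro i hk h1
    by_cases hlt : i < fm.length - 1
    · have hP := ih (i + 1) (by omega) (by omega)
      have hdrop := pvEnum_drop_cons fm i (by omega)
      have part1 : ∀ ia : Int,
          ((PySem.List.enumerate fm 0).drop i).foldl (pvStepA fm order tidx) ia
            = pvRefLoop fm (pvG order tidx) i ia false := by
        intro ia
        rw [hdrop]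
        simp only [List.foldl_cons]
        rw [pvStepA_interior fm order tidx ia i _ h1 hlt,
          pvRefLoop.eq_def, if_pos hlt]
        by_cases hc : pvIsCont (fm.getD i "") = true
        · simp only [hc, if_true, Bool.false_eq_true, if_false]
          exact hP.1 ia
        · simp only [hc, Bool.false_eq_true, if_false]
          cases hidx : PySem.List.index? order (pvFieldName (fm.getD i "")) with
          | none =>
            have hg : pvG order tidx (pvFieldName (fm.getD i "")) = false := by
              unfold pvG; rw [hidx]
            simp only [hg, Bool.false_eq_true, if_false]
            exact hP.1 ia
          | some fidx =>
            by_cases hf : fidx < tidx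
            · have hg : pvG order tidx (pvFieldName (fm.getD i "")) = true := by
                unfold pvG; rw [hidx]; simpa using hf
              simp only [hg, if_true, hf]
              exact (hP.2 (i : Int)).symm
            · have hg : pvG order tidx (pvFieldName (fm.getD i "")) = false := by
                unfold pvG; rw [hidx]; simpa using hf
              simp only [hg, hf, Bool.false_eq_true, if_false]
              exact hP.1 ia
      refine ⟨part1, fun acc => ?_⟩
      by_cases hc : pvIsCont (fm.getD i "") = true
      · have hext : pvExtendA fm (fm.length - 1) i acc
            = pvExtendA fm (fm.length - 1) (i + 1) (i : Int) := by
          rw [pvExtendA.eq_def, if_pos hlt, if_pos hc]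
        rw [pvRefLoop.eq_def, if_pos hlt]
        simp only [hc, if_true]
        rw [hext, hdrop]
        simp only [List.foldl_cons]
        rw [pvStepA_interior fm order tidx _ i _ h1 hlt]
        simp only [hc, if_true]
        exact hP.2 (i : Int)
      · have hext : pvExtendA fm (fm.length - 1) i acc = acc := by
          rw [pvExtendA.eq_def, if_pos hlt, if_neg hc]
        have htf : pvRefLoop fm (pvG order tidx) i acc true
            = pvRefLoop fm (pvG order tidx) i acc false := by
          rw [pvRefLoop.eq_def, if_pos hlt]
          conv_rhs => rw [pvRefLoop.eq_def, if_pos hlt]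
          simp only [hc, Bool.false_eq_true, if_false]
        rw [htf, hext, part1 acc]
    · have hge : fm.length - 1 ≤ i := by omega
      have hstop := hlt
      refine ⟨fun ia => ?_, fun acc => ?_⟩
      · rw [pvRefLoop.eq_def, if_neg hstop]
        exact pvA_tail fm order tidx i ia h1 hge
      · have hext : pvExtendA fm (fm.length - 1) i acc = acc := by
          rw [pvExtendA.eq_def, if_neg hstop]
        rw [pvRefLoop.eq_def, if_neg hstop, hext,
          pvA_tail fm order tidx i acc h1 hge]

theorem pvB_eq_ref (fm order : List String) (tidx : Nat) :
    ∀ i : Nat, 1 ≤ i → ∀ (bs : List (String × Int)) (ia : Int) (ext : Bool),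
      bs.foldl (pvStepB2 order tidx) 0 = ia →
      ((bs = [] ∧ ext = false) ∨
        (∃ l p, bs = l ++ [p] ∧ pvG order tidx p.1 = ext ∧ (ext = true → p.2 = ia))) →
      ((PySem.List.pyRange (i : Int) ((fm.length : Int) - 1) 1).foldl (pvStepB1 fm) bs).foldl
          (pvStepB2 order tidx) 0
        = pvRefLoop fm (pvG order tidx) i ia ext := by
  suffices H : ∀ k i : Nat, fm.length - 1 - i ≤ k → 1 ≤ i →
      ∀ (bs : List (String × Int)) (ia : Int) (ext : Bool),
      bs.foldl (pvStepB2 order tidx) 0 = ia →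
      ((bs = [] ∧ ext = false) ∨
        (∃ l p, bs = l ++ [p] ∧ pvG order tidx p.1 = ext ∧ (ext = true → p.2 = ia))) →
      ((PySem.List.pyRange (i : Int) ((fm.length : Int) - 1) 1).foldl (pvStepB1 fm) bs).foldl
          (pvStepB2 order tidx) 0
        = pvRefLoop fm (pvG order tidx) i ia ext by
    exact fun i hi => H fm.length i (by omega) hi
  intro k
  induction k with
  | zero =>
    intro i hk h1 bs ia ext hia hinv
    have hstop : ¬ i < fm.length - 1 := by omega
    have hnil : PySem.List.pyRange (i : Int) ((fm.length : Int) - 1) 1 = [] := by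
      apply PySem.List.pyRange_one_eq_nil; omega
    rw [hnil, pvRefLoop.eq_def, if_neg hstop]
    simpa using hia
  | succ k ih =>
    intro i hk h1 bs ia ext hia hinv
    by_cases hlt : i < fm.length - 1
    · have hcons : PySem.List.pyRange (i : Int) ((fm.length : Int) - 1) 1
          = (i : Int) :: PySem.List.pyRange ((i : Int) + 1) ((fm.length : Int) - 1) 1 := by
        apply PySem.List.pyRange_one_cons; omega
      have hcast : ((i : Int) + 1) = (((i + 1 : Nat)) : Int) := by push_cast; ring
      rw [hcons, List.foldl_cons, hcast]
      rw [pvRefLoop.eq_def, if_pos hlt]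
      have hline : PySem.List.pyGetD fm (i : Int) "" = fm.getD i "" := by
        simp [PySem.List.pyGetD_natCast, List.getD_eq_getElem?_getD]
      by_cases hc : pvIsCont (fm.getD i "") = true
      · -- continuation line
        simp only [hc, if_true]
        rcases hinv with ⟨hbse, hexf⟩ | ⟨l, p, rfl, hg, hend⟩
        · subst hbse hexf
          have hstep : pvStepB1 fm [] (i : Int) = [] := by
            unfold pvStepB1; rw [hline, if_pos hc]; rfl
          rw [hstep]
          simp only [Bool.false_eq_true, if_false]
          exact ih (i + 1) (by omega) (by omega) [] ia false hia (Or.inl ⟨rfl, rfl⟩)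
        · have hne : (l ++ [p]).isEmpty = false := by simp
          have hstep : pvStepB1 fm (l ++ [p]) (i : Int) = l ++ [(p.1, (i : Int))] := by
            unfold pvStepB1
            rw [hline, if_pos hc, hne]
            simp only [Bool.false_eq_true, if_false, List.dropLast_concat,
              List.getLastD_concat]
          rw [hstep]
          have hfl : (l ++ [p]).foldl (pvStepB2 order tidx) 0
              = if pvG order tidx p.1 = true then p.2
                else l.foldl (pvStepB2 order tidx) 0 := by
            rw [List.foldl_append, List.foldl_cons, List.foldl_nil, pvStepB2_eq]
          cases hext : ext with
          | true =>
            subst hext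
            have hgp : pvG order tidx p.1 = true := hg
            simp only [if_true]
            refine ih (i + 1) (by omega) (by omega) (l ++ [(p.1, (i : Int))]) (i : Int) true ?_
              (Or.inr ⟨l, (p.1, (i : Int)), rfl, hgp, fun _ => rfl⟩)
            rw [List.foldl_append, List.foldl_cons, List.foldl_nil, pvStepB2_eq]
            simp [hgp]
          | false =>
            subst hext
            have hgp : pvG order tidx p.1 = false := hg
            have hfl' : l.foldl (pvStepB2 order tidx) 0 = ia := by
              rw [hfl, hgp] at hia; simpa using hia
            simp only [Bool.false_eq_true, if_false]
            refine ih (i + 1) (by omega) (by omega) (l ++ [(p.1, (i : Int))]) ia false ?_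
              (Or.inr ⟨l, (p.1, (i : Int)), rfl, hgp, fun h => by simp at h⟩)
            rw [List.foldl_append, List.foldl_cons, List.foldl_nil, pvStepB2_eq]
            simp [hgp, hfl']
      · -- field line
        simp only [hc, Bool.false_eq_true, if_false]
        have hstep : pvStepB1 fm bs (i : Int)
            = bs ++ [(pvFieldName (fm.getD i ""), (i : Int))] := by
          unfold pvStepB1; rw [hline, if_neg hc]
        rw [hstep]
        have hfold : (bs ++ [(pvFieldName (fm.getD i ""), (i : Int))]).foldl
              (pvStepB2 order tidx) 0
            = if pvG order tidx (pvFieldName (fm.getD i "")) = true then (i : Int) else ia := by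
          rw [List.foldl_append, List.foldl_cons, List.foldl_nil, pvStepB2_eq, hia]
        cases hq : pvG order tidx (pvFieldName (fm.getD i "")) with
        | true =>
          simp only [if_true]
          refine ih (i + 1) (by omega) (by omega) _ (i : Int) true ?_
            (Or.inr ⟨bs, _, rfl, hq, fun _ => rfl⟩)
          rw [hfold, hq]; simp
        | false =>
          simp only [Bool.false_eq_true, if_false]
          refine ih (i + 1) (by omega) (by omega) _ ia false ?_
            (Or.inr ⟨bs, _, rfl, hq, fun h => by simp at h⟩)
          rw [hfold, hq]; simp
    · have hnil : PySem.List.pyRange (i : Int) ((fm.length : Int) - 1) 1 = [] := by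
        apply PySem.List.pyRange_one_eq_nil; omega
      rw [hnil, pvRefLoop.eq_def, if_neg hlt]
      simpa using hia

theorem pvMain (fm order : List String) (tidx : Nat) :
    (PySem.List.enumerate fm 0).foldl (pvStepA fm order tidx) 0
      = ((PySem.List.pyRange 1 ((fm.length : Int) - 1) 1).foldl (pvStepB1 fm) []).foldl
          (pvStepB2 order tidx) 0 := by
  have hB := pvB_eq_ref fm order tidx 1 (by omega) [] 0 false rfl (Or.inl ⟨rfl, rfl⟩)
  have hA : (PySem.List.enumerate fm 0).foldl (pvStepA fm order tidx) 0
      = pvRefLoop fm (pvG order tidx) 1 0 false := by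
    cases fm with
    | nil =>
      rw [pvRefLoop.eq_def]
      simp [PySem.List.enumerate]
    | cons x rest =>
      have henum : PySem.List.enumerate (x :: rest) 0
          = (0, x) :: PySem.List.enumerate rest 1 := by
        rw [PySem.List.enumerate_cons]; norm_num
      rw [henum, List.foldl_cons]
      have hstep : pvStepA (x :: rest) order tidx 0 ((0 : Int), x) = 0 := by
        unfold pvStepA; simp
      rw [hstep]
      have hdrop : PySem.List.enumerate rest 1
          = (PySem.List.enumerate (x :: rest) 0).drop 1 := by
        rw [henum]
        rfl
      rw [hdrop]
      exact (pvA_eq_ref (x :: rest) order tidx 1 (by omega)).1 0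
  rw [hA, ← hB]
  norm_num

theorem insert_field_py_spec : Claim_equal_insert_field_py := by
  intro fm key value order _
  unfold Spec_insert_field_py
  simp only [insert_field_py, insert_field_py_alt]
  rw [pvMain]
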